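-- pv_equiv track=rewrite | github.com/circuitqed/razzle | engine/razzle/core/bitboard.py | get_ray_to
-- ===== SOURCE A (Python) =====
-- ROWS = 8
--
-- COLS = 7
--
-- def sq_to_rowcol(sq: int) -> tuple[int, int]:
--     """Convert square index to (row, col)."""
--     return sq // COLS, sq % COLS
--
-- def rowcol_to_sq(row: int, col: int) -> int:
--     """Convert (row, col) to square index."""
--     return row * COLS + col
--
-- def is_valid_sq(row: int, col: int) -> bool:
--     """Check if (row, col) is on the board."""
--     return 0 <= row < ROWS and 0 <= col < COLS
--
-- def bit(sq: int) -> int: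
--     """Return bitboard with single bit set at square."""
--     return 1 << sq
--
-- def get_ray_to(from_sq: int, to_sq: int, occupied: int) -> int | None:
--     """
--     Get the first piece encountered on ray from from_sq toward to_sq.
--     Returns square index or None if no piece found or not on same line.
--     """
--     r1, c1 = sq_to_rowcol(from_sq)
--     r2, c2 = sq_to_rowcol(to_sq)
--
--     dr = 0 if r2 == r1 else (1 if r2 > r1 else -1)
--     dc = 0 if c2 == c1 else (1 if c2 > c1 else -1)
--
--     if dr == 0 and dc == 0:
--         return None
--
--     r, c = r1 + dr, c1 + dc
--     while is_valid_sq(r, c):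
--         sq = rowcol_to_sq(r, c)
--         if occupied & bit(sq):
--             return sq
--         r += dr
--         c += dc
--
--     return None
-- ===== SOURCE B (Python) =====
-- ROWS = 8
--
-- COLS = 7
--
-- def get_ray_to(from_sq: int, to_sq: int, occupied: int) -> int | None:
--     """Bitboard-style: build the ray mask once, then bitscan mask & occupied."""
--     r1, c1 = from_sq // COLS, from_sq % COLS
--     r2, c2 = to_sq // COLS, to_sq % COLS
--
--     dr = (r2 > r1) - (r2 < r1)
--     dc = (c2 > c1) - (c2 < c1)
--
--     if dr == 0 and dc == 0:
--         return None
--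
--     mask = 0
--     r, c = r1 + dr, c1 + dc
--     while 0 <= r < ROWS and 0 <= c < COLS:
--         mask |= 1 << (r * COLS + c)
--         r += dr
--         c += dc
--
--     hits = mask & occupied
--     if hits == 0:
--         return None
--     if dr > 0 or (dr == 0 and dc > 0):
--         return (hits & -hits).bit_length() - 1   # blocker nearest from_sq: lowest bit
--     return hits.bit_length() - 1                 # ray runs downward: highest bit
-- ===== Notes on version B (the rewrite author's own statement) =====
-- stated objective: alternative
-- what changed: B replaces A's walk-and-test loop (checking occupancy at every step and returning the first hit) by the bitboard idiom: build the ray mask once with a plain walk, intersect it with occupied in a single AND, and extract the blocker nearest from_sq by a bitscan (lowest set bit via hits & -hits when the ray increases square index, highest set bit via bit_length otherwise).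
import Mathlib
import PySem

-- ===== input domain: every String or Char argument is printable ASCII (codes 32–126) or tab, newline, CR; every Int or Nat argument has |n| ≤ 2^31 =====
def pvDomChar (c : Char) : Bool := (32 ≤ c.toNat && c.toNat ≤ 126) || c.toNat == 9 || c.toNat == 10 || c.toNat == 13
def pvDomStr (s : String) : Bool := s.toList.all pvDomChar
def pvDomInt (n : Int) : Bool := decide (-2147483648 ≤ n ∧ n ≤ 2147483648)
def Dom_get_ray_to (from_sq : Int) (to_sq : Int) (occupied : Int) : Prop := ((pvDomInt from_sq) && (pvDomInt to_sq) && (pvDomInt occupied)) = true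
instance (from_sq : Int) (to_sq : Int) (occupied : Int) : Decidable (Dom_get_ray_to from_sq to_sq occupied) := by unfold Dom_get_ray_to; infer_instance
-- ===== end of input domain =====

-- B replaces A's walk-and-test loop by the bitboard idiom: build the ray mask once,
-- AND it with occupied, then bitscan (lowest/highest set bit) for the nearest blocker (objective: alternative).

-- ===== PORT A =====
def sq_to_rowcol (sq : Int) : Int × Int := (PySem.Int.floordiv sq 7, PySem.Int.mod sq 7)

def rowcol_to_sq (row : Int) (col : Int) : Int := row * 7 + col

def is_valid_sq (row : Int) (col : Int) : Bool :=
  (decide (0 ≤ row) && decide (row < 8)) && (decide (0 ≤ col) && decide (col < 7))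

-- Python's `1 << sq`; every call site passes a valid square, so 0 ≤ sq and `.toNat` is exact
def bit (sq : Int) : Int := 1 <<< sq.toNat

-- A's while loop; fuel 9 is never exhausted: on-board iterations move r (resp. c)
-- strictly monotonically inside [0,8) (resp. [0,7)), so at most 8 of them occur
def rayWhile (occupied : Int) (dr : Int) (dc : Int) (r : Int) (c : Int) (fuel : Nat) : Option Int :=
  match fuel with
  | 0 => none
  | fuel + 1 =>
    if is_valid_sq r c then
      let sq := rowcol_to_sq r c
      if PySem.Int.band occupied (bit sq) ≠ 0 then some sq
      else rayWhile occupied dr dc (r + dr) (c + dc) fuel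
    else none

def get_ray_to (from_sq : Int) (to_sq : Int) (occupied : Int) : Option Int :=
  let rc1 := sq_to_rowcol from_sq
  let rc2 := sq_to_rowcol to_sq
  let r1 := rc1.1
  let c1 := rc1.2
  let r2 := rc2.1
  let c2 := rc2.2
  let dr : Int := if r2 = r1 then 0 else if r2 > r1 then 1 else -1
  let dc : Int := if c2 = c1 then 0 else if c2 > c1 then 1 else -1
  if dr = 0 ∧ dc = 0 then none
  else rayWhile occupied dr dc (r1 + dr) (c1 + dc) 9

-- ===== PORT B =====
-- Source B's mask-building while loop (same fuel argument as A's loop: at most 8 on-board steps)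
def maskWhile (dr : Int) (dc : Int) (r : Int) (c : Int) (mask : Int) (fuel : Nat) : Int :=
  match fuel with
  | 0 => mask
  | fuel + 1 =>
    if (decide (0 ≤ r) && decide (r < 8)) && (decide (0 ≤ c) && decide (c < 7)) then
      maskWhile dr dc (r + dr) (c + dc) (PySem.Int.bor mask (1 <<< (r * 7 + c).toNat)) fuel
    else mask

def get_ray_to_alt (from_sq : Int) (to_sq : Int) (occupied : Int) : Option Int :=
  let r1 := PySem.Int.floordiv from_sq 7
  let c1 := PySem.Int.mod from_sq 7
  let r2 := PySem.Int.floordiv to_sq 7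
  let c2 := PySem.Int.mod to_sq 7
  let dr : Int := (if r2 > r1 then 1 else 0) - (if r2 < r1 then 1 else 0)
  let dc : Int := (if c2 > c1 then 1 else 0) - (if c2 < c1 then 1 else 0)
  if dr = 0 ∧ dc = 0 then none
  else
    let mask := maskWhile dr dc (r1 + dr) (c1 + dc) 0 9
    let hits := PySem.Int.band mask occupied
    if hits = 0 then none
    else if 0 < dr ∨ (dr = 0 ∧ 0 < dc) then
      some ((PySem.Int.bitLength (PySem.Int.band hits (-hits)) : Int) - 1)
    else
      some ((PySem.Int.bitLength hits : Int) - 1)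

-- ===== PRECONDITION & SPEC =====
def Spec_get_ray_to (from_sq : Int) (to_sq : Int) (occupied : Int) (out : Option Int) : Prop := out = get_ray_to_alt from_sq to_sq occupied
instance (from_sq : Int) (to_sq : Int) (occupied : Int) (out : Option Int) : Decidable (Spec_get_ray_to from_sq to_sq occupied out) := by unfold Spec_get_ray_to; infer_instance

-- ===== CLAIM (what is proved, stated in full; the proofs are below) =====
def Claim_equal_get_ray_to : Prop := ∀ (from_sq : Int) (to_sq : Int) (occupied : Int), Dom_get_ray_to from_sq to_sq occupied → Spec_get_ray_to from_sq to_sq occupied (get_ray_to from_sq to_sq occupied)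

-- ===== LEMMAS AND PROOFS =====

-- bit i of occupied, Python two's-complement reading (works for negative occupied too)
def obit (occ : Int) (i : Nat) : Bool :=
  if 0 ≤ occ then occ.toNat.testBit i else !((-occ - 1).toNat.testBit i)

-- Nat value of `band ↑m occ`
def bandNat (m : Nat) (occ : Int) : Nat :=
  if 0 ≤ occ then m &&& occ.toNat else m.ldiff (-occ - 1).toNat

lemma ldiff_add_and (m : Nat) : ∀ x : Nat, m.ldiff x + (m &&& x) = m := by
  induction m using Nat.strong_induction_on with
  | _ m ih =>
    intro x
    rcases Nat.eq_zero_or_pos m with h0 | hpos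
    · subst h0
      have hz : Nat.ldiff 0 x = 0 :=
        Nat.eq_of_testBit_eq (fun i => by simp [Nat.testBit_ldiff, Nat.zero_testBit])
      simp [hz]
    · have h2 : m / 2 < m := Nat.div_lt_self hpos (by norm_num)
      have hl : (m.ldiff x) / 2 = (m / 2).ldiff (x / 2) := by
        apply Nat.eq_of_testBit_eq
        intro i
        simp [Nat.testBit_div_two, Nat.testBit_ldiff]
      have ha : (m &&& x) / 2 = (m / 2) &&& (x / 2) := by
        apply Nat.eq_of_testBit_eq
        intro i
        simp [Nat.testBit_div_two, Nat.testBit_and]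
      have hb1 : (m.ldiff x).testBit 0 = (m.testBit 0 && !(x.testBit 0)) := Nat.testBit_ldiff m x 0
      have hb2 : (m &&& x).testBit 0 = (m.testBit 0 && x.testBit 0) := Nat.testBit_and m x 0
      rw [Nat.testBit_zero, Nat.testBit_zero, Nat.testBit_zero] at hb1
      rw [Nat.testBit_zero, Nat.testBit_zero, Nat.testBit_zero] at hb2
      have hrec := ih (m / 2) h2 (x / 2)
      have e1 := Nat.div_add_mod (m.ldiff x) 2
      have e2 := Nat.div_add_mod (m &&& x) 2
      have e3 := Nat.div_add_mod m 2
      rcases Nat.mod_two_eq_zero_or_one m with hm | hm <;>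
        rcases Nat.mod_two_eq_zero_or_one x with hx | hx <;>
        rcases Nat.mod_two_eq_zero_or_one (m.ldiff x) with hld | hld <;>
        rcases Nat.mod_two_eq_zero_or_one (m &&& x) with hnd | hnd <;>
        simp [hm, hx, hld, hnd] at hb1 hb2 ⊢ <;> omega

lemma sub_and_eq_ldiff (m x : Nat) : m - (m &&& x) = m.ldiff x := by
  have := ldiff_add_and m x
  omega

lemma band_cast (m : Nat) (occ : Int) : PySem.Int.band (↑m) occ = ↑(bandNat m occ) := by
  by_cases h : 0 ≤ occ
  · simp [PySem.Int.band, bandNat, h, Int.toNat_natCast]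
  · simp [PySem.Int.band, bandNat, h, Int.toNat_natCast, sub_and_eq_ldiff]

lemma bandNat_testBit (m : Nat) (occ : Int) (i : Nat) :
    (bandNat m occ).testBit i = (m.testBit i && obit occ i) := by
  by_cases h : 0 ≤ occ
  · simp [bandNat, obit, h, Nat.testBit_and]
  · simp [bandNat, obit, h, Nat.testBit_ldiff]

-- value of `band occ ↑(2^k)`: Python's `occupied & bit(sq)` test
lemma band_two_pow (occ : Int) (k : Nat) :
    PySem.Int.band occ (↑(2 ^ k : Nat)) = if obit occ k then ↑(2 ^ k : Nat) else 0 := by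
  rw [PySem.Int.band_comm, band_cast]
  have hbits : bandNat (2 ^ k) occ = if obit occ k then 2 ^ k else 0 := by
    apply Nat.eq_of_testBit_eq
    intro i
    rw [bandNat_testBit, Nat.testBit_two_pow]
    by_cases hob : obit occ k
    · by_cases hik : k = i
      · subst hik; simp [hob]
      · simp [hob, hik]
    · by_cases hik : k = i
      · subst hik; simp [hob, Nat.zero_testBit]
      · simp [hob, hik, Nat.zero_testBit]
  rw [hbits]
  by_cases hob : obit occ k <;> simp [hob]

-- Nat mirror of maskWhile with accumulator 0 (uses 2^k for the shifted bit)
def mnat (dr : Int) (dc : Int) : Nat → Int → Int → Nat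
  | 0, _, _ => 0
  | fuel + 1, r, c =>
    if (0 ≤ r ∧ r < 8) ∧ (0 ≤ c ∧ c < 7) then
      2 ^ (r * 7 + c).toNat ||| mnat dr dc fuel (r + dr) (c + dc)
    else 0

lemma maskWhile_acc (dr dc : Int) :
    ∀ (f : Nat) (r c : Int) (a : Nat),
      maskWhile dr dc r c (↑a) f = ↑(a ||| mnat dr dc f r c) := by
  intro f
  induction f with
  | zero => intro r c a; simp [maskWhile, mnat]
  | succ f ih =>
    intro r c a
    by_cases hv : (0 ≤ r ∧ r < 8) ∧ (0 ≤ c ∧ c < 7)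
    · have hb : ((1 <<< (r * 7 + c).toNat : Nat) : Int) = ↑(2 ^ (r * 7 + c).toNat : Nat) := by
        rw [Nat.shiftLeft_eq, one_mul]
      have hvb : ((decide (0 ≤ r) && decide (r < 8)) && (decide (0 ≤ c) && decide (c < 7))) = true := by
        simp; omega
      rw [maskWhile]
      rw [if_pos hvb, hb, PySem.Int.bor_natCast, ih, mnat, if_pos hv, Nat.lor_assoc]
    · have hvb : ((decide (0 ≤ r) && decide (r < 8)) && (decide (0 ≤ c) && decide (c < 7))) = false := by
        simp; omega
      rw [maskWhile]
      rw [if_neg (by simp [hvb]), mnat, if_neg hv]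
      simp

lemma mnat_bits_ge (dr dc : Int) (hs : 0 < 7 * dr + dc) :
    ∀ (f : Nat) (r c : Int) (i : Nat),
      (mnat dr dc f r c).testBit i = true → r * 7 + c ≤ (i : Int) := by
  intro f
  induction f with
  | zero => intro r c i h; simp [mnat, Nat.zero_testBit] at h
  | succ f ih =>
    intro r c i h
    by_cases hv : (0 ≤ r ∧ r < 8) ∧ (0 ≤ c ∧ c < 7)
    · rw [mnat, if_pos hv, Nat.testBit_or, Bool.or_eq_true] at h
      rcases h with h | h
      · rw [Nat.testBit_two_pow, decide_eq_true_eq] at h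
        have : ((r * 7 + c).toNat : Int) = r * 7 + c := Int.toNat_of_nonneg (by omega)
        omega
      · have := ih (r + dr) (c + dc) i h
        omega
    · rw [mnat, if_neg hv] at h
      simp [Nat.zero_testBit] at h

lemma mnat_bits_le (dr dc : Int) (hs : 7 * dr + dc < 0) :
    ∀ (f : Nat) (r c : Int) (i : Nat),
      (mnat dr dc f r c).testBit i = true → (i : Int) ≤ r * 7 + c := by
  intro f
  induction f with
  | zero => intro r c i h; simp [mnat, Nat.zero_testBit] at h
  | succ f ih =>
    intro r c i h
    by_cases hv : (0 ≤ r ∧ r < 8) ∧ (0 ≤ c ∧ c < 7)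
    · rw [mnat, if_pos hv, Nat.testBit_or, Bool.or_eq_true] at h
      rcases h with h | h
      · rw [Nat.testBit_two_pow, decide_eq_true_eq] at h
        have : ((r * 7 + c).toNat : Int) = r * 7 + c := Int.toNat_of_nonneg (by omega)
        omega
      · have := ih (r + dr) (c + dc) i h
        omega
    · rw [mnat, if_neg hv] at h
      simp [Nat.zero_testBit] at h

-- highest set bit: Python's hits.bit_length() - 1
lemma msb_scan (hn k : Nat) (hk : hn.testBit k = true)
    (hhigh : ∀ i, k < i → hn.testBit i = false) :
    PySem.Int.bitLength (↑hn) = k + 1 := by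
  have hne : hn ≠ 0 := by
    intro h0; rw [h0, Nat.zero_testBit] at hk; exact Bool.false_ne_true hk
  have hlow : 2 ^ k ≤ hn := Nat.ge_two_pow_of_testBit hk
  have hup : hn < 2 ^ (k + 1) := Nat.lt_pow_two_of_testBit hn (fun i hi => hhigh i (by omega))
  have h1 : hn < 2 ^ PySem.Int.bitLength (↑hn : Int) := by
    have := PySem.Int.lt_two_pow_bitLength (↑hn : Int)
    simpa using this
  have h2 : 2 ^ (PySem.Int.bitLength (↑hn : Int) - 1) ≤ hn := by
    have := PySem.Int.two_pow_bitLength_le (↑hn : Int) (by exact_mod_cast hne)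
    simpa using this
  have hk_lt : k < PySem.Int.bitLength (↑hn : Int) :=
    (Nat.pow_lt_pow_iff_right (by norm_num)).mp (lt_of_le_of_lt hlow h1)
  have hle : PySem.Int.bitLength (↑hn : Int) - 1 < k + 1 :=
    (Nat.pow_lt_pow_iff_right (by norm_num)).mp (lt_of_le_of_lt h2 hup)
  omega

-- lowest set bit: Python's hits & -hits
lemma lsb_band (hn k : Nat) (hk : hn.testBit k = true)
    (hlow : ∀ i, i < k → hn.testBit i = false) :
    PySem.Int.band (↑hn) (-(↑hn : Int)) = ↑(2 ^ k : Nat) := by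
  have hpos : 0 < hn := by
    rcases Nat.eq_zero_or_pos hn with h0 | h; · rw [h0, Nat.zero_testBit] at hk; cases hk
    · exact h
  have hneg : ¬(0 ≤ -(↑hn : Int)) := by
    simp only [not_le]; omega
  have htn : (-(-(↑hn : Int)) - 1).toNat = hn - 1 := by omega
  rw [PySem.Int.band]
  rw [if_pos (by positivity), if_neg hneg, htn, Int.toNat_natCast]
  -- hn % 2^(k+1) = 2^k
  have hmod : hn % 2 ^ (k + 1) = 2 ^ k := by
    apply Nat.eq_of_testBit_eq
    intro i
    rw [Nat.testBit_mod_two_pow, Nat.testBit_two_pow]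
    by_cases hik : i = k
    · subst hik; simp [hk]
    · by_cases hilt : i < k
      · simp [hlow i hilt, Ne.symm hik]
      · have : ¬ i < k + 1 := by omega
        simp [this, Ne.symm hik]
  set u := hn / 2 ^ (k + 1) with hu
  have hdecomp : 2 ^ (k + 1) * u + 2 ^ k = hn := by
    rw [hu, ← hmod]
    exact Nat.div_add_mod hn (2 ^ (k + 1))
  have hklt : (2 ^ k : Nat) < 2 ^ (k + 1) := by
    exact Nat.pow_lt_pow_right (by norm_num) (by omega)
  have hsub1 : hn - 1 = 2 ^ (k + 1) * u + (2 ^ k - 1) := by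
    have : (1:Nat) ≤ 2 ^ k := Nat.one_le_two_pow
    omega
  have hand : hn &&& (hn - 1) = 2 ^ (k + 1) * u := by
    apply Nat.eq_of_testBit_eq
    intro j
    rw [Nat.testBit_and]
    have hb1 : hn.testBit j = if j < k + 1 then (2 ^ k : Nat).testBit j else u.testBit (j - (k + 1)) := by
      rw [← hdecomp]; exact Nat.testBit_two_pow_mul_add u hklt j
    have hb2 : (hn - 1).testBit j =
        if j < k + 1 then (2 ^ k - 1 : Nat).testBit j else u.testBit (j - (k + 1)) := by
      rw [hsub1]; exact Nat.testBit_two_pow_mul_add u (by omega) j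
    have hb3 : (2 ^ (k + 1) * u).testBit j =
        if j < k + 1 then (0 : Nat).testBit j else u.testBit (j - (k + 1)) := by
      have : 2 ^ (k + 1) * u = 2 ^ (k + 1) * u + 0 := by omega
      rw [this]; exact Nat.testBit_two_pow_mul_add u (Nat.two_pow_pos (k + 1)) j
    rw [hb1, hb2, hb3]
    by_cases hj : j < k + 1
    · simp only [hj, if_true]
      rw [Nat.testBit_two_pow, Nat.testBit_two_pow_sub_one, Nat.zero_testBit]
      by_cases hjk : j = k
      · subst hjk; simp
      · simp [Ne.symm hjk]
    · simp [hj, Bool.and_self]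
  rw [hand]
  congr 1
  omega

lemma bitLength_two_pow (k : Nat) : PySem.Int.bitLength (↑(2 ^ k : Nat)) = k + 1 := by
  apply msb_scan (2 ^ k) k
  · simp
  · intro i hi
    rw [Nat.testBit_two_pow]
    simp; omega

-- the value of A's occupancy test at a valid square
lemma band_bit_test (occ : Int) (r c : Int) (_h0 : 0 ≤ r * 7 + c) :
    (PySem.Int.band occ (bit (r * 7 + c)) ≠ 0) ↔ obit occ ((r * 7 + c).toNat) = true := by
  have hb : bit (r * 7 + c) = ↑(2 ^ (r * 7 + c).toNat : Nat) := by
    rw [bit, Nat.shiftLeft_eq, one_mul]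
  rw [hb, band_two_pow]
  by_cases hob : obit occ ((r * 7 + c).toNat)
  · simp [hob]
  · simp [hob]

-- main loop lemma, increasing ray (square index grows along the walk): first hit = lowest bit
lemma ray_up (occ dr dc : Int) (hs : 0 < 7 * dr + dc) :
    ∀ (f : Nat) (r c : Int),
      rayWhile occ dr dc r c f =
        (if PySem.Int.band (↑(mnat dr dc f r c)) occ = 0 then none
         else some ((PySem.Int.bitLength
             (PySem.Int.band (PySem.Int.band (↑(mnat dr dc f r c)) occ)
               (-(PySem.Int.band (↑(mnat dr dc f r c)) occ))) : Int) - 1)) := by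
  intro f
  induction f with
  | zero =>
    intro r c
    simp [rayWhile, mnat, PySem.Int.band_comm, PySem.Int.band_zero]
  | succ f ih =>
    intro r c
    by_cases hv : (0 ≤ r ∧ r < 8) ∧ (0 ≤ c ∧ c < 7)
    · have h0 : (0:Int) ≤ r * 7 + c := by omega
      have hkk : (((r * 7 + c).toNat : Nat) : Int) = r * 7 + c := Int.toNat_of_nonneg h0
      set k : Nat := (r * 7 + c).toNat with hkdef
      have hvB : is_valid_sq r c = true := by simp [is_valid_sq]; omega
      have hM : mnat dr dc (f + 1) r c = 2 ^ k ||| mnat dr dc f (r + dr) (c + dc) := by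
        rw [mnat, if_pos hv]
      by_cases hob : obit occ k = true
      · -- occupied square found: A returns it; B's blob has lowest bit k
        have hA : rayWhile occ dr dc r c (f + 1) = some (r * 7 + c) := by
          rw [rayWhile, if_pos hvB]
          simp only [rowcol_to_sq]
          rw [if_pos (by rw [band_bit_test occ r c h0]; exact hob)]
        rw [hA, hM, band_cast]
        set hn : Nat := bandNat (2 ^ k ||| mnat dr dc f (r + dr) (c + dc)) occ with hhn
        have hbit : ∀ i : Nat, hn.testBit i = ((2 ^ k ||| mnat dr dc f (r + dr) (c + dc)).testBit i && obit occ i) := by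
          intro i; rw [hhn, bandNat_testBit]
        have hk : hn.testBit k = true := by
          rw [hbit, Nat.testBit_or, Nat.testBit_two_pow]
          simp [hob]
        have hlow : ∀ i, i < k → hn.testBit i = false := by
          intro i hi
          rw [hbit, Nat.testBit_or, Nat.testBit_two_pow]
          have h1 : decide (k = i) = false := by simp; omega
          have h2 : (mnat dr dc f (r + dr) (c + dc)).testBit i = false := by
            by_contra hcon
            have := mnat_bits_ge dr dc hs f (r + dr) (c + dc) i
              (by revert hcon; cases (mnat dr dc f (r + dr) (c + dc)).testBit i <;> simp)
            have : (i : Int) < r * 7 + c := by omega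
            omega
          rw [h1, h2]
          simp
        have hne : (↑hn : Int) ≠ 0 := by
          have : hn ≠ 0 := fun hz => by rw [hz, Nat.zero_testBit] at hk; cases hk
          exact_mod_cast this
        rw [if_neg hne, lsb_band hn k hk hlow, bitLength_two_pow]
        congr 1
        push_cast
        omega
      · -- empty square: both sides step to the next square
        have hA : rayWhile occ dr dc r c (f + 1) = rayWhile occ dr dc (r + dr) (c + dc) f := by
          rw [rayWhile, if_pos hvB]
          simp only [rowcol_to_sq]
          rw [if_neg (by rw [band_bit_test occ r c h0]; exact hob)]
        have hsame : bandNat (2 ^ k ||| mnat dr dc f (r + dr) (c + dc)) occ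
            = bandNat (mnat dr dc f (r + dr) (c + dc)) occ := by
          apply Nat.eq_of_testBit_eq
          intro i
          rw [bandNat_testBit, bandNat_testBit, Nat.testBit_or, Nat.testBit_two_pow]
          by_cases hik : k = i
          · subst hik
            simp [hob]
          · simp [hik]
        have heq : PySem.Int.band (↑(mnat dr dc (f + 1) r c)) occ
            = PySem.Int.band (↑(mnat dr dc f (r + dr) (c + dc))) occ := by
          rw [hM, band_cast, hsame, ← band_cast]
        rw [hA, heq]
        exact ih (r + dr) (c + dc)
    · have hvB : is_valid_sq r c = false := by
        simp [is_valid_sq]; omega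
      rw [rayWhile, if_neg (by simp [hvB]), mnat, if_neg hv]
      simp [PySem.Int.band_comm, PySem.Int.band_zero]

-- main loop lemma, decreasing ray: first hit = highest bit
lemma ray_down (occ dr dc : Int) (hs : 7 * dr + dc < 0) :
    ∀ (f : Nat) (r c : Int),
      rayWhile occ dr dc r c f =
        (if PySem.Int.band (↑(mnat dr dc f r c)) occ = 0 then none
         else some ((PySem.Int.bitLength (PySem.Int.band (↑(mnat dr dc f r c)) occ) : Int) - 1)) := by
  intro f
  induction f with
  | zero =>
    intro r c
    simp [rayWhile, mnat, PySem.Int.band_comm, PySem.Int.band_zero]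
  | succ f ih =>
    intro r c
    by_cases hv : (0 ≤ r ∧ r < 8) ∧ (0 ≤ c ∧ c < 7)
    · have h0 : (0:Int) ≤ r * 7 + c := by omega
      have hkk : (((r * 7 + c).toNat : Nat) : Int) = r * 7 + c := Int.toNat_of_nonneg h0
      set k : Nat := (r * 7 + c).toNat with hkdef
      have hvB : is_valid_sq r c = true := by simp [is_valid_sq]; omega
      have hM : mnat dr dc (f + 1) r c = 2 ^ k ||| mnat dr dc f (r + dr) (c + dc) := by
        rw [mnat, if_pos hv]
      by_cases hob : obit occ k = true
      · have hA : rayWhile occ dr dc r c (f + 1) = some (r * 7 + c) := by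
          rw [rayWhile, if_pos hvB]
          simp only [rowcol_to_sq]
          rw [if_pos (by rw [band_bit_test occ r c h0]; exact hob)]
        rw [hA, hM, band_cast]
        set hn : Nat := bandNat (2 ^ k ||| mnat dr dc f (r + dr) (c + dc)) occ with hhn
        have hbit : ∀ i : Nat, hn.testBit i = ((2 ^ k ||| mnat dr dc f (r + dr) (c + dc)).testBit i && obit occ i) := by
          intro i; rw [hhn, bandNat_testBit]
        have hk : hn.testBit k = true := by
          rw [hbit, Nat.testBit_or, Nat.testBit_two_pow]
          simp [hob]
        have hhigh : ∀ i, k < i → hn.testBit i = false := by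
          intro i hi
          rw [hbit, Nat.testBit_or, Nat.testBit_two_pow]
          have h1 : decide (k = i) = false := by simp; omega
          have h2 : (mnat dr dc f (r + dr) (c + dc)).testBit i = false := by
            by_contra hcon
            have := mnat_bits_le dr dc hs f (r + dr) (c + dc) i
              (by revert hcon; cases (mnat dr dc f (r + dr) (c + dc)).testBit i <;> simp)
            have : r * 7 + c < (i : Int) := by omega
            omega
          rw [h1, h2]
          simp
        have hne : (↑hn : Int) ≠ 0 := by
          have : hn ≠ 0 := fun hz => by rw [hz, Nat.zero_testBit] at hk; cases hk
          exact_mod_cast this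
        rw [if_neg hne, msb_scan hn k hk hhigh]
        congr 1
        push_cast
        omega
      · have hA : rayWhile occ dr dc r c (f + 1) = rayWhile occ dr dc (r + dr) (c + dc) f := by
          rw [rayWhile, if_pos hvB]
          simp only [rowcol_to_sq]
          rw [if_neg (by rw [band_bit_test occ r c h0]; exact hob)]
        have hsame : bandNat (2 ^ k ||| mnat dr dc f (r + dr) (c + dc)) occ
            = bandNat (mnat dr dc f (r + dr) (c + dc)) occ := by
          apply Nat.eq_of_testBit_eq
          intro i
          rw [bandNat_testBit, bandNat_testBit, Nat.testBit_or, Nat.testBit_two_pow]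
          by_cases hik : k = i
          · subst hik
            simp [hob]
          · simp [hik]
        have heq : PySem.Int.band (↑(mnat dr dc (f + 1) r c)) occ
            = PySem.Int.band (↑(mnat dr dc f (r + dr) (c + dc))) occ := by
          rw [hM, band_cast, hsame, ← band_cast]
        rw [hA, heq]
        exact ih (r + dr) (c + dc)
    · have hvB : is_valid_sq r c = false := by
        simp [is_valid_sq]; omega
      rw [rayWhile, if_neg (by simp [hvB]), mnat, if_neg hv]
      simp [PySem.Int.band_comm, PySem.Int.band_zero]

-- B's mask as the Nat mirror
lemma mask_eq_mnat (dr dc r c : Int) :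
    maskWhile dr dc r c 0 9 = ↑(mnat dr dc 9 r c) := by
  have : (0 : Int) = ((0 : Nat) : Int) := rfl
  rw [this, maskWhile_acc]
  simp

-- ===== VERDICT (by name: the statement is the Claim_ definition above) =====
theorem get_ray_to_spec : Claim_equal_get_ray_to := by
  unfold Claim_equal_get_ray_to Spec_get_ray_to
  intro from_sq to_sq occupied _
  unfold get_ray_to get_ray_to_alt sq_to_rowcol
  simp only []
  set r1 := PySem.Int.floordiv from_sq 7 with hr1
  set c1 := PySem.Int.mod from_sq 7 with hc1
  set r2 := PySem.Int.floordiv to_sq 7 with hr2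
  set c2 := PySem.Int.mod to_sq 7 with hc2
  rcases lt_trichotomy r2 r1 with hr | hr | hr <;>
    rcases lt_trichotomy c2 c1 with hc | hc | hc
  · norm_num [hr, show ¬ r2 = r1 by omega, show ¬ r2 > r1 by omega, hc, show ¬ c2 = c1 by omega, show ¬ c2 > c1 by omega, mask_eq_mnat]
    exact ray_down occupied (-1) (-1) (by norm_num) 9 _ _
  · norm_num [hr, show ¬ r2 = r1 by omega, show ¬ r2 > r1 by omega, hc, mask_eq_mnat]
    exact ray_down occupied (-1) 0 (by norm_num) 9 _ _
  · norm_num [hr, show ¬ r2 = r1 by omega, show ¬ r2 > r1 by omega, hc, show ¬ c2 = c1 by omega, show ¬ c2 < c1 by omega, mask_eq_mnat]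
    exact ray_down occupied (-1) 1 (by norm_num) 9 _ _
  · norm_num [hr, hc, show ¬ c2 = c1 by omega, show ¬ c2 > c1 by omega, mask_eq_mnat]
    exact ray_down occupied 0 (-1) (by norm_num) 9 _ _
  · norm_num [hr, hc]
  · norm_num [hr, hc, show ¬ c2 = c1 by omega, show ¬ c2 < c1 by omega, mask_eq_mnat]
    exact ray_up occupied 0 1 (by norm_num) 9 _ _
  · norm_num [hr, show ¬ r2 = r1 by omega, show ¬ r2 < r1 by omega, hc, show ¬ c2 = c1 by omega, show ¬ c2 > c1 by omega, mask_eq_mnat]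
    exact ray_up occupied 1 (-1) (by norm_num) 9 _ _
  · norm_num [hr, show ¬ r2 = r1 by omega, show ¬ r2 < r1 by omega, hc, mask_eq_mnat]
    exact ray_up occupied 1 0 (by norm_num) 9 _ _
  · norm_num [hr, show ¬ r2 = r1 by omega, show ¬ r2 < r1 by omega, hc, show ¬ c2 = c1 by omega, show ¬ c2 < c1 by omega, mask_eq_mnat]
    exact ray_up occupied 1 1 (by norm_num) 9 _ _
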